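-- pv_equiv track=rewrite | github.com/Vrushabh6454/Financial_statement_analysis | npnonlyf/pdf_parser.py | _is_financial_table
-- ===== SOURCE A (Python) =====
-- from typing import Dict, List, Tuple, Optional, Any
--
-- def _is_financial_table(table: List[List[str]]) -> bool:
--     """
--     Determine if a table contains financial statement data.
--     """
--     if not table or len(table) < 3:
--         return False
--
--     table_text = ' '.join([' '.join(row) for row in table if row])
--     table_text = table_text.lower()
--
--     financial_keywords = [
--         'revenue', 'sales', 'income', 'profit', 'loss', 'assets', 'liabilities',
--         'equity', 'cash', 'expenses', 'cost', 'margin', 'earnings', 'ebit', 'ebitda',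
--         'balance sheet', 'income statement', 'cash flow', 'statement of operations',
--         'consolidated', 'financial', 'statement', 'annual report', 'fiscal year',
--         'net', 'total', 'operating', 'gross', 'debt', 'depreciation'
--     ]
--
--     currency_indicators = ['$', '€', '£', '¥', 'thousand', 'million', 'billion', 'USD', 'EUR', 'GBP', 'JPY']
--
--     # Increase sensitivity by checking if any of these terms are in the table
--     keyword_count = sum(1 for keyword in financial_keywords if keyword in table_text)
--     currency_count = sum(1 for indicator in currency_indicators if indicator in table_text)
--
--     # More lenient check - return true if we have at least one financial keyword
--     return keyword_count >= 1 or currency_count >= 1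
-- ===== SOURCE B (Python) =====
-- from typing import Dict, List, Tuple, Optional, Any
--
-- # One combined term list; the all-uppercase currency codes USD/EUR/GBP/JPY are
-- # dropped because the blob is lowercased first, so they can never match.
-- _TERMS = [
--     'revenue', 'sales', 'income', 'profit', 'loss', 'assets', 'liabilities',
--     'equity', 'cash', 'expenses', 'cost', 'margin', 'earnings', 'ebit', 'ebitda',
--     'balance sheet', 'income statement', 'cash flow', 'statement of operations',
--     'consolidated', 'financial', 'statement', 'annual report', 'fiscal year',
--     'net', 'total', 'operating', 'gross', 'debt', 'depreciation',
--     '$', '\u20ac', '\u00a3', '\u00a5', 'thousand', 'million', 'billion',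
-- ]
--
-- # index the terms by first character, so each scan position only tries candidates
-- _BY_FIRST: dict = {}
-- for _t in _TERMS:
--     _BY_FIRST.setdefault(_t[0], []).append(_t)
--
-- def _is_financial_table(table: List[List[str]]) -> bool:
--     if len(table) < 3:
--         return False
--     blob = ' '.join(' '.join(row) for row in table if row).lower()
--     # single left-to-right scan: at each position, try the terms starting with that char
--     for i, ch in enumerate(blob):
--         for t in _BY_FIRST.get(ch, ()):
--             if blob.startswith(t, i):
--                 return True
--     return False
-- ===== Notes on version B (the rewrite author's own statement) =====
-- stated objective: alternative
-- what changed: A counts matches with two term-major loops (one per keyword list), each scanning the whole blob per term; B merges both lists into one combined term list (dropping the uppercase currency codes, which can never match the lowercased blob), indexes the terms by first character in a dict built once, and does a single position-major left-to-right scan of the blob, testing at each position only the terms starting with that character, returning on the first hit.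
import Mathlib
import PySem

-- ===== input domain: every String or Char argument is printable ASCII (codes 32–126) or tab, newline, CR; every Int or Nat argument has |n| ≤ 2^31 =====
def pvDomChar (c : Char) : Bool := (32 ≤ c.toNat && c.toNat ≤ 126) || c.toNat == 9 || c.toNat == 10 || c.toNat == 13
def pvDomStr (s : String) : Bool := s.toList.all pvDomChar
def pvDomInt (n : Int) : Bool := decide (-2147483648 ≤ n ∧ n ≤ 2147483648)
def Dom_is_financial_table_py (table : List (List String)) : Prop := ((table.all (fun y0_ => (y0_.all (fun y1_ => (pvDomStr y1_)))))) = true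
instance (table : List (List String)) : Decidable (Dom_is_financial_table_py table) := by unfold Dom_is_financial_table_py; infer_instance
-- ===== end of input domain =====

-- B replaces A's two term-major substring-count loops by one position-major scan of the
-- blob, trying at each position only the terms of a first-character dict index built from
-- the single combined term list (the never-matching uppercase codes dropped);
-- objective: alternative traversal, equal value everywhere.

-- ===== PORT A =====
def pvFinancialKeywords : List String := [
  "revenue", "sales", "income", "profit", "loss", "assets", "liabilities",
  "equity", "cash", "expenses", "cost", "margin", "earnings", "ebit", "ebitda",
  "balance sheet", "income statement", "cash flow", "statement of operations",
  "consolidated", "financial", "statement", "annual report", "fiscal year",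
  "net", "total", "operating", "gross", "debt", "depreciation"]

def pvCurrencyIndicators : List String :=
  ["$", "€", "£", "¥", "thousand", "million", "billion", "USD", "EUR", "GBP", "JPY"]

def is_financial_table_py (table : List (List String)) : Bool :=
  -- if not table or len(table) < 3: return False
  if table = [] ∨ table.length < 3 then false
  else
    -- table_text = ' '.join([' '.join(row) for row in table if row]); .lower()
    let table_text := PySem.Str.join " " ((table.filter (fun row => !row.isEmpty)).map (fun row => PySem.Str.join " " row))
    let table_text := PySem.Str.lower table_text
    -- keyword_count = sum(1 for keyword in financial_keywords if keyword in table_text)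
    let keyword_count : Int := (pvFinancialKeywords.map (fun keyword => if PySem.Str.isIn keyword table_text then (1:Int) else 0)).sum
    let currency_count : Int := (pvCurrencyIndicators.map (fun indicator => if PySem.Str.isIn indicator table_text then (1:Int) else 0)).sum
    decide (1 ≤ keyword_count) || decide (1 ≤ currency_count)

-- ===== PORT B =====
def pvTerms : List String := [
  "revenue", "sales", "income", "profit", "loss", "assets", "liabilities",
  "equity", "cash", "expenses", "cost", "margin", "earnings", "ebit", "ebitda",
  "balance sheet", "income statement", "cash flow", "statement of operations",
  "consolidated", "financial", "statement", "annual report", "fiscal year",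
  "net", "total", "operating", "gross", "debt", "depreciation",
  "$", "€", "£", "¥", "thousand", "million", "billion"]

-- first-character index: _BY_FIRST.setdefault(t[0], []).append(t) is Dict.modify with default []
def pvByFirst : PySem.Dict Char (List String) :=
  pvTerms.foldl (fun d t => PySem.Dict.modify d t.toList.headI [] (fun l => l ++ [t])) PySem.Dict.empty

def is_financial_table_py_alt (table : List (List String)) : Bool :=
  if table.length < 3 then false
  else
    let blob := (PySem.Str.lower (PySem.Str.join " " ((table.filter (fun row => !row.isEmpty)).map (fun row => PySem.Str.join " " row)))).toList
    -- for i, ch in enumerate(blob): for t in _BY_FIRST.get(ch, ()): if blob.startswith(t, i): return True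
    -- blob.startswith(t, i) with 0 ≤ i < len(blob) is exactly "t is a prefix of blob[i:]"
    (PySem.List.enumerate blob).any (fun p =>
      (PySem.Dict.getD pvByFirst p.2 []).any (fun t =>
        PySem.Chars.startswith (blob.drop p.1.toNat) t.toList))

-- ===== PRECONDITION & SPEC =====
def Spec_is_financial_table_py (table : List (List String)) (out : Bool) : Prop := out = is_financial_table_py_alt table
instance (table : List (List String)) (out : Bool) : Decidable (Spec_is_financial_table_py table out) := by unfold Spec_is_financial_table_py; infer_instance

-- ===== CLAIM (what is proved, stated in full; the proofs are below) =====
def Claim_equal_is_financial_table_py : Prop := ∀ (table : List (List String)), Dom_is_financial_table_py table → Spec_is_financial_table_py table (is_financial_table_py table)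

-- ===== LEMMAS AND PROOFS =====

-- sum(1 for t in terms if t in s) >= 1  ⟺  some term is in s
theorem pvCountGeOne (terms : List String) (s : String) :
    decide (1 ≤ ((terms.map (fun k => if PySem.Str.isIn k s then (1:Int) else 0)).sum)) =
      terms.any (fun k => PySem.Str.isIn k s) := by
  rw [PySem.List.sum_map_ite_one_zero, Bool.eq_iff_iff, decide_eq_true_iff, List.any_eq_true]
  constructor
  · intro h
    have h0 : 0 < terms.countP (fun k => PySem.Str.isIn k s) := by exact_mod_cast h
    exact List.countP_pos_iff.mp h0
  · intro h
    have h0 : 0 < terms.countP (fun k => PySem.Str.isIn k s) := List.countP_pos_iff.mpr h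
    exact_mod_cast h0

-- every character of a lowered string avoids 'A'..'Z'
theorem pvLowerChar_not_upper (c : Char) :
    ¬ ('A' ≤ PySem.Chars.lowerChar c ∧ PySem.Chars.lowerChar c ≤ 'Z') := by
  rintro ⟨h1, h2⟩
  unfold PySem.Chars.lowerChar at h1 h2
  by_cases hu : PySem.Chars.isupper c = true
  · rw [if_pos hu] at h1 h2
    unfold PySem.Chars.isupper at hu
    simp only [Bool.and_eq_true, decide_eq_true_eq] at hu
    obtain ⟨ha, hb⟩ := hu
    have hca : 65 ≤ c.toNat := Fin.mk_le_mk.mp ha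
    have hcb : c.toNat ≤ 90 := Fin.mk_le_mk.mp hb
    have hv : (Char.ofNat (c.toNat + 32)).toNat = c.toNat + 32 := by
      rw [Char.toNat_ofNat, if_pos (Or.inl (by omega))]
    have h1' : (65:Nat) ≤ (Char.ofNat (c.toNat + 32)).toNat := Fin.mk_le_mk.mp h1
    have h2' : (Char.ofNat (c.toNat + 32)).toNat ≤ 90 := Fin.mk_le_mk.mp h2
    omega
  · rw [Bool.not_eq_true] at hu
    rw [hu] at h1 h2
    rw [if_neg Bool.false_ne_true] at h1 h2
    have : PySem.Chars.isupper c = true := by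
      unfold PySem.Chars.isupper; simp only [Bool.and_eq_true, decide_eq_true_eq]
      exact ⟨h1, h2⟩
    rw [hu] at this; exact Bool.false_ne_true this

-- an uppercase-initial term is never a substring of a lowered string
theorem pvCodeNotIn (t s : String) (c : Char) (hhd : c ∈ t.toList)
    (hc : 'A' ≤ c ∧ c ≤ 'Z') :
    PySem.Str.isIn t (PySem.Str.lower s) = false := by
  rw [← Bool.not_eq_true, PySem.Str.isIn_iff_infix]
  intro hinf
  have hmem : c ∈ (PySem.Str.lower s).toList := hinf.mem hhd
  rw [PySem.Str.toList_lower] at hmem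
  unfold PySem.Chars.lower at hmem
  rw [List.mem_map] at hmem
  obtain ⟨d, _, hd⟩ := hmem
  exact pvLowerChar_not_upper d (hd ▸ hc)

-- the setdefault/append fold: a lookup in the first-char index is a filter of the term list
theorem pvByFirstFold (terms : List String) (d : PySem.Dict Char (List String)) (c : Char) :
    PySem.Dict.getD (terms.foldl (fun d t => PySem.Dict.modify d t.toList.headI [] (fun l => l ++ [t])) d) c [] =
      PySem.Dict.getD d c [] ++ terms.filter (fun t => t.toList.headI == c) := by
  induction terms generalizing d with
  | nil => simp
  | cons t ts ih =>
    rw [List.foldl_cons, ih, List.filter_cons]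
    by_cases hc : t.toList.headI = c
    · subst hc
      rw [PySem.Dict.getD_modify_self]
      simp
    · rw [PySem.Dict.getD_modify_of_ne _ _ _ (fun h => hc h.symm)]
      simp [hc]

theorem pvByFirst_getD (c : Char) :
    PySem.Dict.getD pvByFirst c [] = pvTerms.filter (fun t => t.toList.headI == c) := by
  unfold pvByFirst
  rw [pvByFirstFold]
  simp [PySem.Dict.getD, PySem.Dict.empty, PySem.Dict.get?]

-- position-major indexed scan over the blob ⟺ term-major substring tests (terms all nonempty)
theorem pvScanEq (L : List Char) (hne : ∀ t ∈ pvTerms, t.toList ≠ []) :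
    (PySem.List.enumerate L).any (fun p =>
        (PySem.Dict.getD pvByFirst p.2 []).any (fun t =>
          PySem.Chars.startswith (L.drop p.1.toNat) t.toList)) =
      pvTerms.any (fun t => PySem.Chars.isIn t.toList L) := by
  rw [Bool.eq_iff_iff]
  simp only [List.any_eq_true, PySem.Chars.startswith_iff, pvByFirst_getD, List.mem_filter]
  constructor
  · rintro ⟨p, _, t, ⟨ht, _⟩, hpre⟩
    exact ⟨t, ht, (PySem.Chars.exists_prefix_drop_iff_isIn _ _).mp ⟨p.1.toNat, hpre⟩⟩
  · rintro ⟨t, ht, hin⟩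
    obtain ⟨j, hpre⟩ := (PySem.Chars.exists_prefix_drop_iff_isIn _ _).mpr hin
    have hj : j < L.length := by
      by_contra hj
      push Not at hj
      rw [List.drop_eq_nil_of_le hj] at hpre
      exact hne t ht (List.prefix_nil.mp hpre)
    refine ⟨((j : Int), L[j]), ?_, t, ⟨ht, ?_⟩, ?_⟩
    · rw [PySem.List.mem_enumerate_iff]
      exact ⟨j, hj, by simp⟩
    · obtain ⟨hd, tl, hts⟩ := List.exists_cons_of_ne_nil (hne t ht)
      have h1 : (L.drop j).head? = some hd := by
        obtain ⟨rest, hrest⟩ := hpre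
        rw [← hrest, hts]
        simp
      rw [List.head?_drop, List.getElem?_eq_getElem hj] at h1
      rw [hts]
      simp [Option.some_inj.mp h1]
    · simpa using hpre

-- ===== VERDICT (by name: the statement is the Claim_ definition above) =====
theorem is_financial_table_py_spec : Claim_equal_is_financial_table_py := by
  intro table _
  unfold Spec_is_financial_table_py is_financial_table_py is_financial_table_py_alt
  by_cases hg : table.length < 3
  · have : table = [] ∨ table.length < 3 := Or.inr hg
    simp only [if_pos this, if_pos hg]
  · have hne : ¬ (table = [] ∨ table.length < 3) := by
      rintro (h | h)
      · exact hg (by simp [h])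
      · exact hg h
    simp only [if_neg hne, if_neg hg]
    set s := PySem.Str.lower (PySem.Str.join " " ((table.filter (fun row => !row.isEmpty)).map (fun row => PySem.Str.join " " row))) with hs
    rw [pvCountGeOne, pvCountGeOne, pvScanEq _ (by decide)]
    have hsplit : pvCurrencyIndicators =
        ["$", "€", "£", "¥", "thousand", "million", "billion"] ++ ["USD", "EUR", "GBP", "JPY"] := rfl
    have hterms : pvTerms = pvFinancialKeywords ++ ["$", "€", "£", "¥", "thousand", "million", "billion"] := rfl
    rw [hsplit, hterms, List.any_append, List.any_append]
    have hcodes : (["USD", "EUR", "GBP", "JPY"] : List String).any (fun k => PySem.Str.isIn k s) = false := by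
      rw [hs]
      simp only [List.any_cons, List.any_nil, Bool.or_eq_false_iff]
      exact ⟨pvCodeNotIn "USD" _ 'U' (by decide) (by decide),
             pvCodeNotIn "EUR" _ 'E' (by decide) (by decide),
             pvCodeNotIn "GBP" _ 'G' (by decide) (by decide),
             pvCodeNotIn "JPY" _ 'J' (by decide) (by decide), trivial⟩
    rw [hcodes, Bool.or_false]
    -- B's any over Chars.isIn on s.toList vs A's Str.isIn on s
    have hIsIn : ∀ t : String, PySem.Chars.isIn t.toList s.toList = PySem.Str.isIn t s := by
      intro t; simp [PySem.Str.isIn]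
    simp only [hIsIn]
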